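-- pv_equiv track=rewrite | github.com/Farmer-Skot/Vibe-Candy | sacred_text_generator.py | mirror_text
-- ===== SOURCE A (Python) =====
-- def mirror_text(lines):
--     """Create mirrored structure (pyramid then inverse)"""
--     result = []
--     max_indent = len(lines) - 1
--     for i, line in enumerate(lines):
--         indent = ' ' * (i * 8)
--         result.append(indent + line)
--     for i in range(len(lines) - 2, -1, -1):
--         indent = ' ' * (i * 8)
--         result.append(indent + lines[i])
--     return '\n'.join(result)
-- ===== SOURCE B (Python) =====
-- def mirror_text(lines):
--     """Create mirrored structure (pyramid then inverse)"""
--     if not lines: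
--         return ''
--     parts = [' ' * ((len(lines) - 1) * 8) + lines[-1]]
--     for i in range(len(lines) - 2, -1, -1):
--         head = ' ' * (i * 8) + lines[i]
--         parts = [head] + parts + [head]
--     return '\n'.join(parts)
-- ===== Notes on version B (the rewrite author's own statement) =====
-- stated objective: alternative
-- what changed: Instead of A's forward pass plus a second backward index pass appending to a result list, B builds the palindrome inside-out: it starts from the innermost (last, deepest-indented) line and one backward loop wraps the accumulator as [head] + parts + [head].
import Mathlib
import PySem

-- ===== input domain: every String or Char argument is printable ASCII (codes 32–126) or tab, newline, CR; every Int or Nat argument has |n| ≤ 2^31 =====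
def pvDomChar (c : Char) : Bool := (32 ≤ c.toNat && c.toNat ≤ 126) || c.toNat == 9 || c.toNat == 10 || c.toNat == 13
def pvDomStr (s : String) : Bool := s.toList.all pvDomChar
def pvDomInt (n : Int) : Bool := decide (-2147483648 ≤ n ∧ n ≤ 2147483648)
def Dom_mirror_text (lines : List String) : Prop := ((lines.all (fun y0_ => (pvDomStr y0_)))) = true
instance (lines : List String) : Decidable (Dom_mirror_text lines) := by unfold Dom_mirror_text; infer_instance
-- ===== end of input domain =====

-- B builds the palindrome from the inside out: one backward loop wraps the innermost
-- line as [head] + parts + [head]; A fills a list with a forward pass then a second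
-- backward pass and joins. Return values proved equal (objective: alternative).

-- ===== PORT A =====
-- ' ' * (i*8) + s
def pvIndent (i : Int) (s : String) : String :=
  String.ofList (List.replicate (i * 8).toNat ' ') ++ s

def mirror_text (lines : List String) : String :=
  let result : List String := []
  let result := (PySem.List.enumerate lines 0).foldl
    (fun acc p => acc ++ [pvIndent p.1 p.2]) result
  -- lines[i] is always in range here; pyGetD with default "" is exact on these indices
  let result := (PySem.List.pyRange ((lines.length : Int) - 2) (-1) (-1)).foldl
    (fun acc i => acc ++ [pvIndent i (PySem.List.pyGetD lines i "")]) result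
  PySem.Str.join "\n" result

-- ===== PORT B =====
def mirror_text_alt (lines : List String) : String :=
  match lines with
  | [] => ""
  | _ :: _ =>
    -- parts starts as [indented last line]; lines[-1] and lines[i] are in range here
    let parts : List String :=
      [pvIndent ((lines.length : Int) - 1) (PySem.List.pyGetD lines (-1) "")]
    let parts := (PySem.List.pyRange ((lines.length : Int) - 2) (-1) (-1)).foldl
      (fun parts i =>
        [pvIndent i (PySem.List.pyGetD lines i "")] ++ parts ++
          [pvIndent i (PySem.List.pyGetD lines i "")]) parts
    PySem.Str.join "\n" parts

-- ===== PRECONDITION & SPEC =====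
def Spec_mirror_text (lines : List String) (out : String) : Prop := out = mirror_text_alt lines
instance (lines : List String) (out : String) : Decidable (Spec_mirror_text lines out) := by unfold Spec_mirror_text; infer_instance

-- ===== CLAIM (what is proved, stated in full; the proofs are below) =====
def Claim_equal_mirror_text : Prop := ∀ (lines : List String), Dom_mirror_text lines → Spec_mirror_text lines (mirror_text lines)

-- ===== LEMMAS AND PROOFS =====

-- the mirrored block of a suffix, as a list of lines (proof-only reference shape)
def pvMir (i : Int) : List String → List String
  | [] => []
  | [s] => [pvIndent i s]
  | s :: t :: ts => pvIndent i s :: (pvMir (i + 1) (t :: ts) ++ [pvIndent i s])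

-- appending one element per step is map
theorem pv_foldl_append_map {α β : Type} (f : α → β) (xs : List α) (init : List β) :
    xs.foldl (fun acc x => acc ++ [f x]) init = init ++ xs.map f := by
  induction xs generalizing init with
  | nil => simp
  | cons x xs ih => simp [List.foldl_cons, ih]

theorem pv_tail_reverse {α : Type} (xs : List α) :
    xs.reverse.tail = xs.dropLast.reverse := by
  induction xs using List.reverseRecOn with
  | nil => simp
  | append_singleton ys y _ => simp

-- the list A accumulates = pyramid ++ pyramid.reverse.tail
theorem pv_lists_eq (lines : List String) :
    (PySem.List.pyRange ((lines.length : Int) - 2) (-1) (-1)).foldl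
        (fun acc i => acc ++ [pvIndent i (PySem.List.pyGetD lines i "")])
        ((PySem.List.enumerate lines 0).foldl (fun acc p => acc ++ [pvIndent p.1 p.2]) []) =
      (PySem.List.enumerate lines 0).map (fun p => pvIndent p.1 p.2) ++
        ((PySem.List.enumerate lines 0).map (fun p => pvIndent p.1 p.2)).reverse.tail := by
  set g : Int → String := fun i => pvIndent i (PySem.List.pyGetD lines i "") with hg
  have hpyr : (PySem.List.enumerate lines 0).map (fun p => pvIndent p.1 p.2)
      = (PySem.List.pyRange 0 (lines.length : Int) 1).map g := by
    rw [PySem.List.enumerate_eq_map_pyRange (d := "")]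
    simp [List.map_map, hg, Function.comp, PySem.List.len_eq]
  rw [pv_foldl_append_map, pv_foldl_append_map, List.nil_append, hpyr]
  congr 1
  rw [pv_tail_reverse, ← List.map_dropLast, PySem.List.pyRange_neg_one_eq_reverse, List.map_reverse]
  congr 2
  have : ((lines.length : Int) - 2) + 1 = (lines.length : Int) - 1 := by ring
  rw [this]
  rcases Nat.eq_zero_or_pos lines.length with h0 | hpos
  · simp [h0, PySem.List.pyRange_one_eq_nil]
  · have hn : (lines.length : Int) = ((lines.length : Int) - 1) + 1 := by ring
    rw [hn, PySem.List.pyRange_one_succ_right (by omega)]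
    simp

-- pvMir of the whole list = pyramid ++ pyramid.reverse.tail
theorem pv_mir_eq_pyramid (ts : List String) (i : Int) (s : String) :
    pvMir i (s :: ts) =
      (PySem.List.enumerate (s :: ts) i).map (fun p => pvIndent p.1 p.2) ++
        ((PySem.List.enumerate (s :: ts) i).map (fun p => pvIndent p.1 p.2)).reverse.tail := by
  induction ts generalizing i s with
  | nil => simp [pvMir, PySem.List.enumerate_cons, PySem.List.enumerate_nil]
  | cons t ts' ih =>
    rw [PySem.List.enumerate_cons]
    set Q : List String := (PySem.List.enumerate (t :: ts') (i + 1)).map (fun p => pvIndent p.1 p.2)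
      with hQ
    have hQrne : Q.reverse ≠ [] := by
      rw [hQ, PySem.List.enumerate_cons]; simp
    have hmap : (((i, s) :: PySem.List.enumerate (t :: ts') (i + 1)).map
        (fun p => pvIndent p.1 p.2)) = pvIndent i s :: Q := by simp [hQ]
    rw [hmap, List.reverse_cons, List.tail_append_of_ne_nil hQrne]
    show pvIndent i s :: (pvMir (i + 1) (t :: ts') ++ [pvIndent i s])
        = pvIndent i s :: Q ++ (Q.reverse.tail ++ [pvIndent i s])
    rw [ih (i + 1) t, ← hQ]
    simp

-- B's inside-out wrapping loop reconstructs pvMir of the whole list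
theorem pv_fold_wrap (lines : List String) (m : Nat) (hm : m < lines.length) :
    (PySem.List.pyRange ((m : Int) - 1) (-1) (-1)).foldl
      (fun parts i =>
        [pvIndent i (PySem.List.pyGetD lines i "")] ++ parts ++
          [pvIndent i (PySem.List.pyGetD lines i "")])
      (pvMir (m : Int) (lines.drop m)) = pvMir 0 lines := by
  induction m with
  | zero =>
    rw [PySem.List.pyRange_neg_one_eq_nil (by norm_num)]
    simp
  | succ m ih =>
    have hm' : m < lines.length := Nat.lt_of_succ_lt hm
    have hr : PySem.List.pyRange (((m : Nat) + 1 : Int) - 1) (-1) (-1)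
        = (m : Int) :: PySem.List.pyRange ((m : Int) - 1) (-1) (-1) := by
      have : (((m : Nat) + 1 : Int) - 1) = (m : Int) := by ring
      rw [this, PySem.List.pyRange_neg_one_cons (by omega)]
    have hget : PySem.List.pyGetD lines (m : Int) "" = lines[m] := by
      rw [PySem.List.pyGetD_natCast]
      simp [List.getD, hm']
    have hdrop : lines.drop m = lines[m] :: lines.drop (m + 1) :=
      List.drop_eq_getElem_cons hm'
    have hdrop' : lines.drop (m + 1) ≠ [] := by
      intro h
      have := List.drop_eq_nil_iff.mp h
      omega
    have hwrap : [pvIndent (m : Int) (PySem.List.pyGetD lines (m : Int) "")] ++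
          pvMir ((m : Nat) + 1 : Int) (lines.drop (m + 1)) ++
          [pvIndent (m : Int) (PySem.List.pyGetD lines (m : Int) "")]
        = pvMir (m : Int) (lines.drop m) := by
      rw [hget, hdrop]
      cases h : lines.drop (m + 1) with
      | nil => exact absurd h hdrop'
      | cons a as =>
        show pvIndent (m : Int) lines[m] :: (pvMir ((m : Nat) + 1 : Int) (a :: as) ++ [pvIndent (m : Int) lines[m]])
            = pvMir (m : Int) (lines[m] :: a :: as)
        have : ((m : Nat) + 1 : Int) = (m : Int) + 1 := by omega
        rw [this]
        rfl
    calc (PySem.List.pyRange (((m : Nat) + 1 : Int) - 1) (-1) (-1)).foldl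
          (fun parts i =>
            [pvIndent i (PySem.List.pyGetD lines i "")] ++ parts ++
              [pvIndent i (PySem.List.pyGetD lines i "")])
          (pvMir ((m : Nat) + 1 : Int) (lines.drop (m + 1)))
        = (PySem.List.pyRange ((m : Int) - 1) (-1) (-1)).foldl
          (fun parts i =>
            [pvIndent i (PySem.List.pyGetD lines i "")] ++ parts ++
              [pvIndent i (PySem.List.pyGetD lines i "")])
          (pvMir (m : Int) (lines.drop m)) := by
          rw [hr, List.foldl_cons, hwrap]
      _ = pvMir 0 lines := ih hm'

-- B's initial singleton is pvMir of the last-element suffix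
theorem pv_init_eq (lines : List String) (h : lines ≠ []) :
    [pvIndent ((lines.length : Int) - 1) (PySem.List.pyGetD lines (-1) "")]
      = pvMir ((lines.length - 1 : Nat) : Int) (lines.drop (lines.length - 1)) := by
  have hpos : 0 < lines.length := List.length_pos_of_ne_nil h
  have hlt : lines.length - 1 < lines.length := by omega
  have hdrop : lines.drop (lines.length - 1) = [lines[lines.length - 1]] := by
    rw [List.drop_eq_getElem_cons hlt]
    have : lines.drop (lines.length - 1 + 1) = [] := by
      apply List.drop_eq_nil_iff.mpr; omega
    rw [this]
  have hget : PySem.List.pyGetD lines (-1) "" = lines[lines.length - 1] := by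
    simp [PySem.List.pyGetD, PySem.List.pyGet?, PySem.List.pyIdx?,
      Nat.one_le_iff_ne_zero.mpr (by omega : lines.length ≠ 0)]
    rw [List.getElem?_eq_getElem (by omega)]
    rfl
  have hcast : ((lines.length : Int) - 1) = ((lines.length - 1 : Nat) : Int) := by omega
  rw [hget, hdrop, hcast, pvMir]

-- ===== VERDICT (by name: the statement is the Claim_ definition above) =====
theorem mirror_text_spec : Claim_equal_mirror_text := by
  intro lines _
  unfold Spec_mirror_text mirror_text mirror_text_alt
  cases hl : lines with
  | nil => simp [PySem.List.enumerate_nil, PySem.List.pyRange_neg_one_eq_nil,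
      PySem.Str.join, PySem.Chars.join_nil]
  | cons s ts =>
    rw [← hl]
    simp only []
    rw [pv_lists_eq]
    have hne : lines ≠ [] := by rw [hl]; simp
    have hpos : 0 < lines.length := List.length_pos_of_ne_nil hne
    have hrange : ((lines.length : Int) - 2) = ((lines.length - 1 : Nat) : Int) - 1 := by omega
    rw [hrange, pv_init_eq lines hne, pv_fold_wrap lines (lines.length - 1) (by omega)]
    rw [hl, pv_mir_eq_pyramid]
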